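-- pv_equiv track=rewrite | github.com/richard-booth/nyt_letterboxed_solver | main.py | get_admissible_words
-- ===== SOURCE A (Python) =====
-- from collections import defaultdict
--
-- top = ['h','t','u']
--
-- left = ['i','s','w']
--
-- right = ['b','r','o']
--
-- bottom = ['q','d','e']
--
-- def get_admissible_words(words):
--     admissible_words = []
--     words_by_letter = defaultdict(list)
--     for word in words:
--         current_letters = top + left + right + bottom
--         for i in range(len(word)):
--             if word[i] not in current_letters:
--                 break
--             else:
--                 if word[i] in top:
--                     current_letters = left + right + bottom
--                 elif word[i] in left:
--                     current_letters = top + right + bottom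
--                 elif word[i] in right:
--                     current_letters = top + left + bottom
--                 else:
--                     current_letters = top + left + right
--         else:
--             admissible_words.append(word)
--             words_by_letter[word[0]].append(word)
--     return admissible_words, words_by_letter
-- ===== SOURCE B (Python) =====
-- from collections import defaultdict
--
-- top = ['h','t','u']
--
-- left = ['i','s','w']
--
-- right = ['b','r','o']
--
-- bottom = ['q','d','e']
--
-- def get_admissible_words(words):
--     side = {c: i for i, grp in enumerate((top, left, right, bottom)) for c in grp}
--     def ok(word):
--         return all(c in side for c in word) and all(
--             side[a] != side[b] for a, b in zip(word, word[1:]))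
--     admissible_words = [w for w in words if ok(w)]
--     words_by_letter = defaultdict(list)
--     for w in admissible_words:
--         words_by_letter[w[0]].append(w)
--     return admissible_words, words_by_letter
-- ===== Notes on version B (the rewrite author's own statement) =====
-- stated objective: simpler
-- what changed: B precomputes a letter-to-side dict once and tests a word by 'all letters on the box and no two consecutive letters on the same side', replacing A's per-character rebuilding of a 9-element allowed-letter list; collecting becomes a filter plus a separate grouping pass.
import Mathlib
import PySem

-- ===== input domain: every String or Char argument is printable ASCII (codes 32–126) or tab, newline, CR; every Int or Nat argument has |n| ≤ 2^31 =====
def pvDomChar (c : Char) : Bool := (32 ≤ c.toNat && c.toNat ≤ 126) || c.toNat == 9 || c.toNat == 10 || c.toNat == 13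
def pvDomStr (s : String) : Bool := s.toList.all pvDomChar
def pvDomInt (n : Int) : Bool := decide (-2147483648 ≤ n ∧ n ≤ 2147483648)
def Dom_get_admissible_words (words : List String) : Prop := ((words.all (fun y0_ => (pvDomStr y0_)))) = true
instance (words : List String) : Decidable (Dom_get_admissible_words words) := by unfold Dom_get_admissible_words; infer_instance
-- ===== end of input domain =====

-- B replaces A's per-step recomputation of the allowed-letter list by a precomputed
-- letter→side map, a filter for admissibility and a separate grouping pass (objective: simpler).

-- ===== PORT A =====
def pvTop : List Char := ['h', 't', 'u']
def pvLeft : List Char := ['i', 's', 'w']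
def pvRight : List Char := ['b', 'r', 'o']
def pvBottom : List Char := ['q', 'd', 'e']

-- A's inner 'for i in range(len(word)) … break / else' loop, carrying current_letters;
-- returns true iff the loop ends without break (i.e. the for-else branch runs)
def pvAdmissA : List Char → List Char → Bool
  | [], _ => true
  | c :: cs, cur =>
    if !(cur.contains c) then false
    else if pvTop.contains c then pvAdmissA cs (pvLeft ++ pvRight ++ pvBottom)
    else if pvLeft.contains c then pvAdmissA cs (pvTop ++ pvRight ++ pvBottom)
    else if pvRight.contains c then pvAdmissA cs (pvTop ++ pvLeft ++ pvBottom)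
    else pvAdmissA cs (pvTop ++ pvLeft ++ pvRight)

def get_admissible_words (words : List String) : List String × (List (String × List String)) :=
  let st := words.foldl
    (fun (st : List String × PySem.Dict String (List String)) word =>
      if pvAdmissA word.toList (pvTop ++ pvLeft ++ pvRight ++ pvBottom) then
        match word.toList with
        | [] => st  -- Python raises IndexError at word[0] here; excluded by Pre_
        | c :: _ => (st.1 ++ [word], st.2.modify (String.ofList [c]) [] (· ++ [word]))
      else st)
    ([], PySem.Dict.empty)
  (st.1, st.2.items)

-- ===== PORT B =====
-- side = {c: i for i, grp in enumerate((top, left, right, bottom)) for c in grp}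
def pvSideMap : PySem.Dict Char Int :=
  (PySem.List.enumerate [pvTop, pvLeft, pvRight, pvBottom]).foldl
    (fun d p => p.2.foldl (fun d c => d.insert c p.1) d) PySem.Dict.empty

-- ok(word): every letter is on the box and no two consecutive letters share a side
def pvOkB (cs : List Char) : Bool :=
  cs.all (fun c => pvSideMap.contains c) &&
  (cs.zip (cs.drop 1)).all (fun p => !(pvSideMap.getD p.1 (-1) == pvSideMap.getD p.2 (-1)))

def get_admissible_words_alt (words : List String) : List String × (List (String × List String)) :=
  let adm := words.filter (fun w => pvOkB w.toList)
  let d := adm.foldl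
    (fun (d : PySem.Dict String (List String)) w =>
      match w.toList with
      | [] => d  -- Python raises IndexError at w[0] here; excluded by Pre_
      | c :: _ => d.modify (String.ofList [c]) [] (· ++ [w]))
    PySem.Dict.empty
  (adm, d.items)

-- ===== PRECONDITION & SPEC =====
-- Pre_ excludes lists containing the empty string, on which Python A (and Python B) raises IndexError at word[0].
def Pre_get_admissible_words (words : List String) : Prop := "" ∉ words
instance (words : List String) : Decidable (Pre_get_admissible_words words) := by
  unfold Pre_get_admissible_words; infer_instance

def pvWitness_get_admissible_words : List String := ["hi", "zz", "ht", "throb"]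

def Spec_get_admissible_words (words : List String) (out : List String × (List (String × List String))) : Prop := out = get_admissible_words_alt words
instance (words : List String) (out : List String × (List (String × List String))) : Decidable (Spec_get_admissible_words words out) := by unfold Spec_get_admissible_words; infer_instance

-- ===== CLAIM (what is proved, stated in full; the proofs are below) =====
def Claim_equal_get_admissible_words : Prop := ∀ (words : List String), Dom_get_admissible_words words → Pre_get_admissible_words words → Spec_get_admissible_words words (get_admissible_words words)

-- ===== LEMMAS AND PROOFS =====

-- the complement list A rebuilds after reading a letter of side s (pvSideMap's values are 0..3)
def pvCompl (s : Int) : List Char :=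
  if s = 0 then pvLeft ++ pvRight ++ pvBottom
  else if s = 1 then pvTop ++ pvRight ++ pvBottom
  else if s = 2 then pvTop ++ pvLeft ++ pvBottom
  else pvTop ++ pvLeft ++ pvRight

-- classification of an arbitrary character against the four sides / the side map
set_option maxHeartbeats 1000000 in
lemma pvClass (c : Char) :
    (pvSideMap.get? c = some 0 ∧ c ∈ pvTop ∧ c ∉ pvLeft ∧ c ∉ pvRight ∧ c ∉ pvBottom) ∨
    (pvSideMap.get? c = some 1 ∧ c ∉ pvTop ∧ c ∈ pvLeft ∧ c ∉ pvRight ∧ c ∉ pvBottom) ∨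
    (pvSideMap.get? c = some 2 ∧ c ∉ pvTop ∧ c ∉ pvLeft ∧ c ∈ pvRight ∧ c ∉ pvBottom) ∨
    (pvSideMap.get? c = some 3 ∧ c ∉ pvTop ∧ c ∉ pvLeft ∧ c ∉ pvRight ∧ c ∈ pvBottom) ∨
    (pvSideMap.get? c = none ∧ c ∉ pvTop ∧ c ∉ pvLeft ∧ c ∉ pvRight ∧ c ∉ pvBottom) := by
  by_cases h0 : c ∈ pvTop
  · left; fin_cases h0 <;> exact ⟨by decide, by decide, by decide, by decide, by decide⟩
  by_cases h1 : c ∈ pvLeft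
  · right; left; fin_cases h1 <;> exact ⟨by decide, by decide, by decide, by decide, by decide⟩
  by_cases h2 : c ∈ pvRight
  · right; right; left; fin_cases h2 <;> exact ⟨by decide, by decide, by decide, by decide, by decide⟩
  by_cases h3 : c ∈ pvBottom
  · right; right; right; left; fin_cases h3 <;> exact ⟨by decide, by decide, by decide, by decide, by decide⟩
  right; right; right; right
  refine ⟨?_, h0, h1, h2, h3⟩
  simp only [pvTop, pvLeft, pvRight, pvBottom, List.mem_cons, List.not_mem_nil, or_false,
    not_or] at h0 h1 h2 h3
  rw [show pvSideMap = PySem.Dict.mk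
    [('h', 0), ('t', 0), ('u', 0), ('i', 1), ('s', 1), ('w', 1),
     ('b', 2), ('r', 2), ('o', 2), ('q', 3), ('d', 3), ('e', 3)] from rfl]
  simp only [PySem.Dict.get?_mk_cons, beq_iff_eq]
  split_ifs <;> first | rfl | (subst_vars; simp_all)

-- core invariant: A's loop from state (complement of side s0) equals B's check with previous letter a
lemma pvAdmiss_compl (cs : List Char) : ∀ (a : Char) (s0 : Int),
    pvSideMap.get? a = some s0 →
    pvAdmissA cs (pvCompl s0) =
      (cs.all (fun c => pvSideMap.contains c) &&
       ((a :: cs).zip cs).all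
         (fun p => !(pvSideMap.getD p.1 (-1) == pvSideMap.getD p.2 (-1)))) := by
  induction cs with
  | nil => intro a s0 _; simp [pvAdmissA]
  | cons c cs ih =>
    intro a s0 ha
    have hs0 : s0 = 0 ∨ s0 = 1 ∨ s0 = 2 ∨ s0 = 3 := by
      rcases pvClass a with ⟨h, -⟩ | ⟨h, -⟩ | ⟨h, -⟩ | ⟨h, -⟩ | ⟨h, -⟩ <;>
        rw [ha] at h <;> simp_all
    have hga : pvSideMap.getD a (-1) = s0 := PySem.Dict.getD_of_get?_eq_some pvSideMap (-1) ha
    have hcontain : ∀ x : Char, pvSideMap.contains x = (pvSideMap.get? x).isSome :=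
      fun x => PySem.Dict.contains_eq_isSome_get? pvSideMap x
    rcases pvClass c with ⟨hc, m0, m1, m2, m3⟩ | ⟨hc, m0, m1, m2, m3⟩ |
        ⟨hc, m0, m1, m2, m3⟩ | ⟨hc, m0, m1, m2, m3⟩ | ⟨hc, m0, m1, m2, m3⟩ <;>
      have hct := hcontain c <;> rw [hc] at hct <;>
      [have hgc : pvSideMap.getD c (-1) = 0 := PySem.Dict.getD_of_get?_eq_some pvSideMap (-1) hc;
       have hgc : pvSideMap.getD c (-1) = 1 := PySem.Dict.getD_of_get?_eq_some pvSideMap (-1) hc;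
       have hgc : pvSideMap.getD c (-1) = 2 := PySem.Dict.getD_of_get?_eq_some pvSideMap (-1) hc;
       have hgc : pvSideMap.getD c (-1) = 3 := PySem.Dict.getD_of_get?_eq_some pvSideMap (-1) hc;
       skip] <;>
      [have hstep := ih c 0 hc; have hstep := ih c 1 hc; have hstep := ih c 2 hc;
       have hstep := ih c 3 hc; skip] <;>
      rcases hs0 with h | h | h | h <;> subst h <;>
      simp_all [pvAdmissA, pvCompl, List.contains_eq_mem, List.zip]

-- A's per-word test from the full 12-letter state equals B's pvOkB (any word)
lemma pvAdmiss_full (cs : List Char) :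
    pvAdmissA cs (pvTop ++ pvLeft ++ pvRight ++ pvBottom) = pvOkB cs := by
  cases cs with
  | nil => simp [pvAdmissA, pvOkB]
  | cons c cs =>
    have hcontain : pvSideMap.contains c = (pvSideMap.get? c).isSome :=
      PySem.Dict.contains_eq_isSome_get? pvSideMap c
    rcases pvClass c with ⟨hc, m0, m1, m2, m3⟩ | ⟨hc, m0, m1, m2, m3⟩ |
        ⟨hc, m0, m1, m2, m3⟩ | ⟨hc, m0, m1, m2, m3⟩ | ⟨hc, m0, m1, m2, m3⟩ <;>
      rw [hc] at hcontain <;>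
      [have hstep := pvAdmiss_compl cs c 0 hc; have hstep := pvAdmiss_compl cs c 1 hc;
       have hstep := pvAdmiss_compl cs c 2 hc; have hstep := pvAdmiss_compl cs c 3 hc; skip] <;>
      simp_all [pvAdmissA, pvOkB, pvCompl, List.contains_eq_mem, List.zip]

-- A's single fold equals B's filter followed by the grouping fold, given no empty word
lemma pvFold_eq (words : List String) : ∀ (acc : List String) (d : PySem.Dict String (List String)),
    (∀ w ∈ words, w ≠ "") →
    words.foldl
      (fun (st : List String × PySem.Dict String (List String)) word =>
        if pvAdmissA word.toList (pvTop ++ pvLeft ++ pvRight ++ pvBottom) then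
          match word.toList with
          | [] => st
          | c :: _ => (st.1 ++ [word], st.2.modify (String.ofList [c]) [] (· ++ [word]))
        else st)
      (acc, d)
    = (acc ++ words.filter (fun w => pvOkB w.toList),
       (words.filter (fun w => pvOkB w.toList)).foldl
         (fun (d : PySem.Dict String (List String)) w =>
           match w.toList with
           | [] => d
           | c :: _ => d.modify (String.ofList [c]) [] (· ++ [w])) d) := by
  induction words with
  | nil => intro acc d _; simp
  | cons w ws ih =>
    intro acc d hne
    have ihw := fun acc d => ih acc d (fun x hx => hne x (List.mem_cons_of_mem w hx))
    cases hcs : w.toList with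
    | nil => exact absurd (String.toList_eq_nil_iff.mp hcs) (hne w List.mem_cons_self)
    | cons c cs =>
      rw [List.foldl_cons, List.filter_cons, pvAdmiss_full, hcs]
      by_cases hok : pvOkB (c :: cs) = true
      · simp only [hok, if_true]
        rw [ihw]
        refine Prod.ext ?_ ?_
        · simp
        · show _ = List.foldl _ d (w :: _)
          rw [List.foldl_cons, hcs]
      · simp only [Bool.not_eq_true] at hok
        simp only [hok, Bool.false_eq_true, if_false]
        rw [ihw]

-- ===== VERDICT (by name: the statement is the Claim_ definition above) =====
theorem get_admissible_words_spec : Claim_equal_get_admissible_words := by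
  intro words _ hpre
  unfold Spec_get_admissible_words get_admissible_words get_admissible_words_alt
  rw [pvFold_eq words [] PySem.Dict.empty (fun x hx he => hpre (he ▸ hx))]
  simp
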